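-- pv_equiv track=rewrite | github.com/wuyinan001/MyLeetcode | Mice and Cheese/solution.py | miceAndCheese
-- ===== SOURCE A (Python) =====
-- from typing import List
--
-- def miceAndCheese(reward1: List[int], reward2: List[int], k: int) -> int:
--     initial=sum(reward2)
--
--     diff=[]
--
--     for x,y in zip(reward1,reward2):
--         diff.append(x-y)
--
--     diff.sort(reverse=True)
--
--     for i in range(k):
--         initial+=diff[i]
--
--     return initial
-- ===== SOURCE B (Python) =====
-- def miceAndCheese(reward1, reward2, k):
--     # sum(reward2) plus the sum of the k largest per-index differences,
--     # found by iterative quickselect (middle-element pivot) instead of a full sort.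
--     total = sum(reward2)
--     arr = [x - y for x, y in zip(reward1, reward2)]
--     while True:
--         if k <= 0:
--             break
--         if len(arr) <= k:
--             total += sum(arr)
--             break
--         pivot = arr[len(arr) // 2]
--         highs = [v for v in arr if v > pivot]
--         if k <= len(highs):
--             arr = highs
--         else:
--             neq = arr.count(pivot)
--             total += sum(highs)
--             k -= len(highs)
--             if k <= neq:
--                 total += pivot * k
--                 break
--             total += pivot * neq
--             k -= neq
--             arr = [v for v in arr if v < pivot]
--     return total
-- ===== Notes on version B (the rewrite author's own statement) =====
-- stated objective: faster
-- what changed: B replaces A's full descending sort of the difference list by an iterative quickselect (middle-element pivot) that accumulates the sum of the k largest differences without ever sorting.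
import Mathlib
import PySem

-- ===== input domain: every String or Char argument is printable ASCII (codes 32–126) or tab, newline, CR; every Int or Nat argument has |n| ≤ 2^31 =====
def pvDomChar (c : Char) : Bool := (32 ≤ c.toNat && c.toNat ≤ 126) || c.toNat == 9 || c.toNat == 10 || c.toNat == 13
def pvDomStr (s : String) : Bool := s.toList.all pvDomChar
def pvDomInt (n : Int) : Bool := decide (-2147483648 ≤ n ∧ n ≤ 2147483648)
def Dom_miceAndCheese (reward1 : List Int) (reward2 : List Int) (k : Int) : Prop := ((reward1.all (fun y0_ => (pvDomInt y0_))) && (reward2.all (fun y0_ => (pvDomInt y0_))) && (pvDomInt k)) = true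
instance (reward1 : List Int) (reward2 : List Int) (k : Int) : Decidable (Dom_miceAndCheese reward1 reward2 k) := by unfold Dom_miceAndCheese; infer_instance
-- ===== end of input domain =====

-- B replaces the full descending sort by an iterative quickselect summing the k largest
-- per-index differences (objective: faster, expected O(n) vs O(n log n)).

-- ===== PORT A =====
def miceAndCheese (reward1 : List Int) (reward2 : List Int) (k : Int) : Int :=
  let initial := reward2.sum
  let diff := (reward1.zip reward2).foldl (fun acc p => acc ++ [p.1 - p.2]) ([] : List Int)
  let diffS := PySem.List.sorted diff (fun x => x) true
  -- pyGetD with default 0 is exact here: Pre_ keeps every index of the loop in range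
  (PySem.List.pyRange 0 k 1).foldl (fun acc i => acc + PySem.List.pyGetD diffS i 0) initial

-- ===== PORT B =====
-- port of Source B's while-loop (state arr, k, total) as a tail recursion
def pvTopkSum (arr : List Int) (k : Int) (total : Int) : Int :=
  if k ≤ 0 then total
  else if _h2 : (arr.length : Int) ≤ k then total + arr.sum
  else
    -- arr[len(arr)//2]: index is always in range here (arr ≠ []); '//' = Int '/' on nonnegatives
    let pivot := PySem.List.pyGetD arr ((arr.length : Int) / 2) 0
    let highs := arr.filter (fun v => decide (pivot < v))
    if k ≤ (highs.length : Int) then pvTopkSum highs k total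
    else
      let neq : Int := PySem.List.count arr pivot
      if k - highs.length ≤ neq then total + highs.sum + pivot * (k - highs.length)
      else pvTopkSum (arr.filter (fun v => decide (v < pivot)))
            (k - highs.length - neq) (total + highs.sum + pivot * neq)
termination_by arr.length
decreasing_by
  all_goals simp_wf
  all_goals {
    have hmem : PySem.List.pyGetD arr ((arr.length : Int) / 2) 0 ∈ arr := by
      rw [PySem.List.pyGetD_eq_getElem arr 0 (by omega) (by omega)]
      exact List.getElem_mem _
    calc (List.filter _ arr.attach).length < arr.attach.length := by
          rw [List.length_filter_lt_length_iff_exists]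
          exact ⟨⟨_, hmem⟩, List.mem_attach _ _, by simp⟩
      _ = arr.length := List.length_attach
  }

def miceAndCheese_alt (reward1 : List Int) (reward2 : List Int) (k : Int) : Int :=
  pvTopkSum ((reward1.zip reward2).map (fun p => p.1 - p.2)) k reward2.sum

-- ===== PRECONDITION & SPEC =====
-- Pre_ excludes exactly the inputs where A raises IndexError: k larger than the difference list.
def Pre_miceAndCheese (reward1 : List Int) (reward2 : List Int) (k : Int) : Prop :=
  k ≤ (min reward1.length reward2.length : Int)
instance (reward1 : List Int) (reward2 : List Int) (k : Int) : Decidable (Pre_miceAndCheese reward1 reward2 k) := by unfold Pre_miceAndCheese; infer_instance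
def pvWitness_miceAndCheese : List Int × List Int × Int := ([3, 1], [2, 4], 1)

def Spec_miceAndCheese (reward1 : List Int) (reward2 : List Int) (k : Int) (out : Int) : Prop := out = miceAndCheese_alt reward1 reward2 k
instance (reward1 : List Int) (reward2 : List Int) (k : Int) (out : Int) : Decidable (Spec_miceAndCheese reward1 reward2 k out) := by unfold Spec_miceAndCheese; infer_instance

-- ===== CLAIM (what is proved, stated in full; the proofs are below) =====
def Claim_equal_miceAndCheese : Prop := ∀ (reward1 : List Int) (reward2 : List Int) (k : Int), Dom_miceAndCheese reward1 reward2 k → Pre_miceAndCheese reward1 reward2 k → Spec_miceAndCheese reward1 reward2 k (miceAndCheese reward1 reward2 k)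

-- ===== LEMMAS AND PROOFS =====

-- the pivot picked at an in-range index is a member
theorem pvGetD_mem (arr : List Int) (i : Int) (d : Int) (h0 : 0 ≤ i) (h1 : i < arr.length) :
    PySem.List.pyGetD arr i d ∈ arr := by
  rw [PySem.List.pyGetD_eq_getElem arr d h0 h1]
  exact List.getElem_mem _

theorem pv_filter_lt (arr : List Int) (p : Int → Bool) (x : Int) (hx : x ∈ arr) (hp : p x = false) :
    (arr.filter p).length < arr.length := by
  rw [List.length_filter_lt_length_iff_exists]
  exact ⟨x, hx, by simp [hp]⟩

-- the descending sort of the diff list, and the spec value "sum of the k largest"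
def pvSDesc (arr : List Int) : List Int := PySem.List.sorted arr (fun x => x) true
def pvTopS (arr : List Int) (k : Int) : Int := ((pvSDesc arr).take k.toNat).sum

theorem pv_foldl_append_eq_map (l : List (Int × Int)) (acc : List Int) :
    l.foldl (fun acc p => acc ++ [p.1 - p.2]) acc = acc ++ l.map (fun p => p.1 - p.2) := by
  induction l generalizing acc with
  | nil => simp
  | cons x t ih => simp [List.foldl, ih]

theorem pv_foldl_range_take (xs : List Int) (init : Int) (n : ℕ) (hn : n ≤ xs.length) :
    (PySem.List.pyRange 0 n 1).foldl (fun acc i => acc + PySem.List.pyGetD xs i 0) init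
      = init + (xs.take n).sum := by
  induction n generalizing init with
  | zero => simp
  | succ m ih =>
    rw [show ((m + 1 : ℕ) : Int) = (m : Int) + 1 by push_cast; ring,
        PySem.List.pyRange_one_succ_right (by positivity)]
    rw [List.foldl_append, ih _ (by omega)]
    simp only [List.foldl_cons, List.foldl_nil]
    rw [PySem.List.pyGetD_eq_getElem xs 0 (by positivity) (by exact_mod_cast (by omega : m < xs.length)),
        List.sum_take_succ xs m (by omega)]
    norm_num
    omega

theorem pv_foldl_range_take_int (xs : List Int) (init : Int) (k : Int) (hk : k ≤ (xs.length : Int)) :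
    (PySem.List.pyRange 0 k 1).foldl (fun acc i => acc + PySem.List.pyGetD xs i 0) init
      = init + (xs.take k.toNat).sum := by
  by_cases hk0 : k ≤ 0
  · rw [PySem.List.pyRange_one_eq_nil hk0]
    simp [Int.toNat_of_nonpos hk0]
  · rw [show k = ((k.toNat : ℕ) : Int) by omega]
    rw [pv_foldl_range_take xs init k.toNat (by omega)]
    simp only [Int.toNat_natCast]

theorem pv_A_eq (reward1 reward2 : List Int) (k : Int)
    (hk : k ≤ (min reward1.length reward2.length : Int)) :
    miceAndCheese reward1 reward2 k
      = reward2.sum + pvTopS ((reward1.zip reward2).map (fun p => p.1 - p.2)) k := by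
  simp only [miceAndCheese]
  rw [pv_foldl_append_eq_map, List.nil_append]
  exact pv_foldl_range_take_int _ _ _ (by
    rw [PySem.List.length_sorted]
    simp [List.length_zip]
    omega)

theorem pv_partition_perm (arr : List Int) (pivot : Int) :
    (arr.filter (fun v => decide (pivot < v)) ++ arr.filter (fun v => decide (v = pivot))
      ++ arr.filter (fun v => decide (v < pivot))).Perm arr := by
  induction arr with
  | nil => simp
  | cons x t ih =>
    rcases lt_trichotomy pivot x with h | h | h
    · simp only [List.filter_cons, h, decide_true, if_pos, show ¬(x = pivot) by omega,
        show ¬(x < pivot) by omega, decide_false, if_neg, Bool.false_eq_true, not_false_iff,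
        List.cons_append]
      exact ih.cons x
    · subst h
      simp only [List.filter_cons, lt_self_iff_false, decide_false, Bool.false_eq_true,
        not_false_iff, if_neg, decide_true, if_pos]
      refine List.Perm.trans ?_ (ih.cons _)
      simpa using
        (List.perm_middle (a := pivot)
          (l₁ := t.filter (fun v => decide (pivot < v)))
          (l₂ := t.filter (fun v => decide (v = pivot)) ++ t.filter (fun v => decide (v < pivot))))
    · simp only [List.filter_cons, show ¬(pivot < x) by omega, show ¬(x = pivot) by omega, h,
        decide_true, decide_false, Bool.false_eq_true, not_false_iff, if_neg, if_pos]
      refine List.Perm.trans ?_ (ih.cons x)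
      simpa [List.append_assoc] using
        (List.perm_middle (a := x)
          (l₁ := t.filter (fun v => decide (pivot < v)) ++ t.filter (fun v => decide (v = pivot)))
          (l₂ := t.filter (fun v => decide (v < pivot))))

-- decomposition of the descending sort around a pivot value
theorem pv_sdesc_decomp (arr : List Int) (pivot : Int) :
    pvSDesc arr
      = pvSDesc (arr.filter (fun v => decide (pivot < v)))
        ++ arr.filter (fun v => decide (v = pivot))
        ++ pvSDesc (arr.filter (fun v => decide (v < pivot))) := by
  have hmemA : ∀ a ∈ pvSDesc (arr.filter (fun v => decide (pivot < v))), pivot < a := by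
    intro a ha
    have := (PySem.List.mem_sorted _ _ _ _).mp ha
    simpa using (List.mem_filter.mp this).2
  have hmemE : ∀ a ∈ arr.filter (fun v => decide (v = pivot)), a = pivot := by
    intro a ha
    simpa using (List.mem_filter.mp ha).2
  have hmemL : ∀ a ∈ pvSDesc (arr.filter (fun v => decide (v < pivot))), a < pivot := by
    intro a ha
    have := (PySem.List.mem_sorted _ _ _ _).mp ha
    simpa using (List.mem_filter.mp this).2
  apply PySem.List.eq_of_perm_of_pairwise_le_of_injective (key := fun x : Int => -x) neg_injective
  · refine (PySem.List.sorted_perm arr _ _).trans ?_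
    refine (pv_partition_perm arr pivot).symm.trans ?_
    exact ((PySem.List.sorted_perm _ (fun x => x) true).symm.append
      (List.Perm.refl _)).append (PySem.List.sorted_perm _ (fun x => x) true).symm
  · exact (PySem.List.sorted_pairwise_rev arr (fun x => x)).imp (fun h => by
      omega)
  · rw [List.append_assoc]
    refine List.pairwise_append.mpr ⟨?_, List.pairwise_append.mpr ⟨?_, ?_, ?_⟩, ?_⟩
    · exact (PySem.List.sorted_pairwise_rev _ (fun x => x)).imp (fun h => by
        omega)
    · exact List.pairwise_of_forall_mem_list (fun a ha b hb => by
        have := hmemE a ha; have := hmemE b hb; omega)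
    · exact (PySem.List.sorted_pairwise_rev _ (fun x => x)).imp (fun h => by
        omega)
    · intro a ha b hb
      have := hmemE a ha; have := hmemL b hb; omega
    · intro a ha b hb
      have ha' := hmemA a ha
      rcases List.mem_append.mp hb with hb | hb
      · have := hmemE b hb; omega
      · have := hmemL b hb; omega

theorem pv_count_eq_filter_length (arr : List Int) (pivot : Int) :
    (PySem.List.count arr pivot : Int)
      = ((arr.filter (fun v => decide (v = pivot))).length : Int) := by
  rw [PySem.List.count_eq, List.count_eq_countP, List.countP_eq_length_filter]
  rfl

theorem pv_sum_filter_eq (arr : List Int) (pivot : Int) (j : ℕ)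
    (hj : j ≤ (arr.filter (fun v => decide (v = pivot))).length) :
    ((arr.filter (fun v => decide (v = pivot))).take j).sum = pivot * j := by
  have h := List.eq_replicate_of_mem (a := pivot)
    (l := arr.filter (fun v => decide (v = pivot))) (fun b hb => by
      simpa using (List.mem_filter.mp hb).2)
  rw [h, List.take_replicate, List.sum_replicate]
  have : min j (arr.filter (fun v => decide (v = pivot))).length = j := by omega
  rw [this]
  ring

theorem pv_sum_filter_full (arr : List Int) (pivot : Int) :
    (arr.filter (fun v => decide (v = pivot))).sum
      = pivot * (arr.filter (fun v => decide (v = pivot))).length := by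
  have := pv_sum_filter_eq arr pivot (arr.filter (fun v => decide (v = pivot))).length le_rfl
  simpa [List.take_of_length_le le_rfl] using this

theorem pv_B_aux (n : ℕ) : ∀ (arr : List Int), arr.length ≤ n → ∀ (k total : Int),
    pvTopkSum arr k total = total + pvTopS arr k := by
  induction n with
  | zero =>
    intro arr harr k total
    have harr0 : arr = [] := List.eq_nil_of_length_eq_zero (by omega)
    subst harr0
    have h0 : pvSDesc ([] : List Int) = [] := (PySem.List.sorted_eq_nil_iff _ _ _).mpr rfl
    rw [pvTopkSum]
    split_ifs with h1 h2
    · simp [pvTopS, h0]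
    · simp [pvTopS, h0]
    · exfalso
      simp only [List.length_nil, Nat.cast_zero] at h2
      omega
  | succ m ih =>
    intro arr harr k total
    rw [pvTopkSum]
    by_cases hk0 : k ≤ 0
    · rw [if_pos hk0]
      simp [pvTopS, Int.toNat_of_nonpos hk0]
    rw [if_neg hk0]
    by_cases hlen : (arr.length : Int) ≤ k
    · rw [dif_pos hlen]
      simp only [pvTopS, pvSDesc]
      rw [List.take_of_length_le (by rw [PySem.List.length_sorted]; omega)]
      rw [(PySem.List.sorted_perm arr _ _).sum_eq]
    rw [dif_neg hlen]
    show (if k ≤ ((arr.filter (fun v => decide (PySem.List.pyGetD arr ((arr.length : Int) / 2) 0 < v))).length : Int) then _ else _) = _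
    set piv := PySem.List.pyGetD arr ((arr.length : Int) / 2) 0 with hpiv
    have hmem : piv ∈ arr := pvGetD_mem arr _ 0 (by omega) (by omega)
    set A := arr.filter (fun v => decide (piv < v)) with hA
    set L := arr.filter (fun v => decide (v < piv)) with hL
    have hAlt : A.length < arr.length := pv_filter_lt arr _ piv hmem (by simp)
    have hLlt : L.length < arr.length := pv_filter_lt arr _ piv hmem (by simp)
    have hlenA : (pvSDesc A).length = A.length := by
      simp [pvSDesc, PySem.List.length_sorted]
    have hsumA : (pvSDesc A).sum = A.sum :=
      List.Perm.sum_eq (PySem.List.sorted_perm A (fun x => x) true)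
    have hdec : pvSDesc arr = pvSDesc A ++ ((arr.filter (fun v => decide (v = piv)))
        ++ pvSDesc L) := by
      rw [pv_sdesc_decomp arr piv, List.append_assoc]
    by_cases hkA : k ≤ (A.length : Int)
    · rw [if_pos hkA, ih A (by omega) k total]
      simp only [pvTopS]
      rw [hdec, List.take_append_of_le_length (by rw [hlenA]; omega)]
    rw [if_neg hkA]
    show (if k - (A.length : Int) ≤ ((PySem.List.count arr piv : ℕ) : Int) then _ else _) = _
    by_cases hkE : k - (A.length : Int) ≤ ((PySem.List.count arr piv : ℕ) : Int)
    · rw [if_pos hkE]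
      rw [pv_count_eq_filter_length arr piv] at hkE
      simp only [pvTopS]
      rw [hdec, List.take_append, List.take_of_length_le (by rw [hlenA]; omega), hlenA,
          List.take_append_of_le_length (by omega), List.sum_append,
          pv_sum_filter_eq arr piv (k.toNat - A.length) (by omega), hsumA]
      have hc : ((k.toNat - A.length : ℕ) : Int) = k - A.length := by omega
      rw [hc]
      ring
    · rw [if_neg hkE]
      rw [pv_count_eq_filter_length arr piv] at hkE ⊢
      rw [ih L (by omega) (k - (A.length : Int) - ((arr.filter (fun v => decide (v = piv))).length : Int))
          (total + A.sum + piv * ((arr.filter (fun v => decide (v = piv))).length : Int))]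
      have hc : (k - (A.length : Int) - ((arr.filter (fun v => decide (v = piv))).length : Int)).toNat
          = k.toNat - A.length - (arr.filter (fun v => decide (v = piv))).length := by omega
      have hRHS : pvTopS arr k
          = A.sum + piv * ((arr.filter (fun v => decide (v = piv))).length : Int)
            + pvTopS L (k - (A.length : Int) - ((arr.filter (fun v => decide (v = piv))).length : Int)) := by
        simp only [pvTopS]
        rw [hdec, List.take_append, List.take_of_length_le (by rw [hlenA]; omega), hlenA,
            List.take_append, List.take_of_length_le (by omega), List.sum_append, List.sum_append,
            hsumA, pv_sum_filter_full arr piv, hc]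
        ring
      rw [hRHS]
      ring


theorem pv_B_eq (arr : List Int) (k total : Int) :
    pvTopkSum arr k total = total + pvTopS arr k :=
  pv_B_aux arr.length arr le_rfl k total

-- ===== VERDICT (by name: the statement is the Claim_ definition above) =====
theorem miceAndCheese_spec : Claim_equal_miceAndCheese := by
  intro r1 r2 k _ hpre
  unfold Spec_miceAndCheese miceAndCheese_alt
  rw [pv_A_eq r1 r2 k hpre, pv_B_eq]
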